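-- pv_equiv track=rewrite | github.com/lucasrofe/alignmentfree | kmers.py | stream_kmers
-- ===== SOURCE A (Python) =====
-- def stream_kmers(text, k):
--     # Precompute the (k-1)-mer (and reverse)
--     kmer = 0
--     rkmer = 0
--     for letter in text[:k-1]:
--         # A = 00, C = 01, T = 10, G = 11
--         # Forward kmer
--         kmer <<= 2
--         letter_value = (ord(letter) >> 1) & 0b11
--         kmer += letter_value
--         # Reverse kmer
--         rkmer >>= 2
--         rev_letter_value = (letter_value + 2) & 0b11
--         rkmer += rev_letter_value << (2 * (k - 1))
--
--     # Stream kmers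
--     mask = (1 << (2 * k)) - 1
--     for letter in text[k-1:]:
--         # Forward kmer
--         kmer <<= 2
--         letter_value = (ord(letter) >> 1) & 0b11
--         kmer += letter_value
--         kmer &= mask
--         # Reverse kmer
--         rkmer >>= 2
--         rev_letter_value = (letter_value + 2) & 0b11
--         rkmer += rev_letter_value << (2 * (k - 1))
--
--         yield kmer, rkmer
-- ===== SOURCE B (Python) =====
-- def stream_kmers(text, k):
--     # Per-window recomputation: for every yield position rebuild the forward
--     # and reverse encodings from scratch over the k-letter window, instead of
--     # rolling a constant-time update along the text.
--     n = len(text)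
--     for i in range(n - k + 1):
--         fwd = 0
--         rev = 0
--         place = 1
--         for c in text[i:i+k]:
--             v = (ord(c) >> 1) & 0b11
--             fwd = fwd * 4 + v
--             rev += ((v + 2) & 0b11) * place
--             place *= 4
--         yield fwd, rev
-- ===== Notes on version B (the rewrite author's own statement) =====
-- stated objective: alternative
-- what changed: replaces the rolling-hash updates (shift/mask forward, shift-down/add-at-top reverse, with a primed (k-1)-mer) by a per-window from-scratch recomputation: each yielded pair is rebuilt by a fresh inner loop over the k-letter window
-- outside the precondition, e.g. on stream_kmers('', 0): A returns [], B returns [(0, 0)]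
import Mathlib
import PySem

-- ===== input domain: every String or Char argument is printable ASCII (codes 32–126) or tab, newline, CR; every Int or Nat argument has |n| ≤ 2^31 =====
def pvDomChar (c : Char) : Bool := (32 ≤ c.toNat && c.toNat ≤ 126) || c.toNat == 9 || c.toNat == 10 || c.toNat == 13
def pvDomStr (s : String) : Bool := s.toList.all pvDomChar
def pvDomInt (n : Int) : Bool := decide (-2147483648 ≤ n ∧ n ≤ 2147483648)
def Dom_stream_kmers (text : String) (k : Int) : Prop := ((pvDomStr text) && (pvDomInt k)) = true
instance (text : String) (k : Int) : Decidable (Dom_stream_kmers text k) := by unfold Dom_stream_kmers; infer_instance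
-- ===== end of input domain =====

-- B replaces A's rolling updates by a from-scratch recomputation of both encodings
-- for every window (objective: alternative decomposition, not faster).


-- ===== PORT A =====
-- Literal transliteration of A.  The generator's yields are collected into a list.
-- '.toNat' on the shift amounts clamps k ≤ 0 to shift 0; Python raises ValueError
-- there (negative shift count), and those inputs are excluded by Pre_ below.
def stream_kmers (text : String) (k : Int) : List (Int × Int) :=
  let chars := text.toList
  -- for letter in text[:k-1]:  (state: kmer, rkmer)
  let s1 : Int × Int :=
    (PySem.List.slice chars none (some (k - 1))).foldl
      (fun (st : Int × Int) letter =>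
        let kmer := st.1 <<< (2 : Nat)
        let letter_value : Int := PySem.Int.band ((letter.toNat : Int) >>> (1 : Nat)) 3
        let kmer := kmer + letter_value
        let rkmer := st.2 >>> (2 : Nat)
        let rev_letter_value := PySem.Int.band (letter_value + 2) 3
        let rkmer := rkmer + (rev_letter_value <<< (2 * (k - 1)).toNat)
        (kmer, rkmer)) (0, 0)
  let mask : Int := ((1 : Int) <<< (2 * k).toNat) - 1
  -- for letter in text[k-1:]:  (state: (kmer, rkmer), yielded list)
  let r :=
    (PySem.List.slice chars (some (k - 1)) none).foldl
      (fun (acc : (Int × Int) × List (Int × Int)) letter =>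
        let kmer := acc.1.1 <<< (2 : Nat)
        let letter_value : Int := PySem.Int.band ((letter.toNat : Int) >>> (1 : Nat)) 3
        let kmer := kmer + letter_value
        let kmer := PySem.Int.band kmer mask
        let rkmer := acc.1.2 >>> (2 : Nat)
        let rev_letter_value := PySem.Int.band (letter_value + 2) 3
        let rkmer := rkmer + (rev_letter_value <<< (2 * (k - 1)).toNat)
        ((kmer, rkmer), acc.2 ++ [(kmer, rkmer)]))
      (s1, [])
  r.2

-- ===== PORT B =====
-- Literal transliteration of Source B: map over range(n-k+1); for each window
-- text[i:i+k] rebuild (fwd, rev, place) by an inner fold from (0, 0, 1).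
def stream_kmers_alt (text : String) (k : Int) : List (Int × Int) :=
  let chars := text.toList
  let n : Int := chars.length
  (PySem.List.pyRange 0 (n - k + 1) 1).map (fun i =>
    let st : Int × Int × Int :=
      (PySem.List.slice chars (some i) (some (i + k))).foldl
        (fun (st : Int × Int × Int) c =>
          let v : Int := PySem.Int.band ((c.toNat : Int) >>> (1 : Nat)) 3
          (st.1 * 4 + v, st.2.1 + PySem.Int.band (v + 2) 3 * st.2.2, st.2.2 * 4))
        (0, 0, 1)
    (st.1, st.2.1))

-- ===== PRECONDITION & SPEC =====
-- Pre_ excludes k ≤ 0: there Python A raises ValueError ('negative shift count')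
-- on every input except ('', 0), where A's degenerate slicing accidentally yields
-- nothing before reaching the negative shift.
def Pre_stream_kmers (text : String) (k : Int) : Prop := 1 ≤ k
instance (text : String) (k : Int) : Decidable (Pre_stream_kmers text k) := by unfold Pre_stream_kmers; infer_instance
def pvWitness_stream_kmers : String × Int := ("ACGT", 2)
def Spec_stream_kmers (text : String) (k : Int) (out : List (Int × Int)) : Prop := out = stream_kmers_alt text k
instance (text : String) (k : Int) (out : List (Int × Int)) : Decidable (Spec_stream_kmers text k out) := by unfold Spec_stream_kmers; infer_instance

-- ===== CLAIM (what is proved, stated in full; the proofs are below) =====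
def Claim_equal_stream_kmers : Prop := ∀ (text : String) (k : Int), Dom_stream_kmers text k → Pre_stream_kmers text k → Spec_stream_kmers text k (stream_kmers text k)

-- ===== LEMMAS AND PROOFS =====

def valC (c : Char) : Int := PySem.Int.band ((c.toNat : Int) >>> (1 : Nat)) 3
def rvC (c : Char) : Int := PySem.Int.band (valC c + 2) 3
def fwdA (a : Int) : List Char → Int
  | [] => a
  | c :: t => fwdA (a * 4 + valC c) t
def revV : List Char → Int
  | [] => 0
  | c :: t => rvC c + 4 * revV t

theorem band_two_pow_sub_one (a : Int) (n : Nat) (h : 0 ≤ a) :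
    PySem.Int.band a (2 ^ n - 1) = a % 2 ^ n := by
  have hp : (1:Int) ≤ 2 ^ n := one_le_pow₀ (by norm_num)
  rw [PySem.Int.band_of_nonneg h (by omega)]
  have h1 : ((2:Int) ^ n - 1).toNat = 2 ^ n - 1 := by
    have h2 : ((2:Int) ^ n) = ((2 ^ n : Nat) : Int) := by push_cast; ring
    omega
  rw [h1, Nat.and_two_pow_sub_one_eq_mod]
  push_cast
  rw [Int.toNat_of_nonneg h]

theorem band3 (a : Int) (h : 0 ≤ a) : PySem.Int.band a 3 = a % 4 := by
  have := band_two_pow_sub_one a 2 h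
  norm_num at this
  exact this

theorem valC_bounds (c : Char) : 0 ≤ valC c ∧ valC c < 4 := by
  have h0 : (0:Int) ≤ (c.toNat : Int) >>> (1 : Nat) := by
    rw [Int.shiftRight_eq_div_pow]
    positivity
  unfold valC
  rw [band3 _ h0]
  exact ⟨Int.emod_nonneg _ (by norm_num), Int.emod_lt_of_pos _ (by norm_num)⟩

theorem rvC_bounds (c : Char) : 0 ≤ rvC c ∧ rvC c < 4 := by
  have h0 : (0:Int) ≤ valC c + 2 := by have := valC_bounds c; omega
  unfold rvC
  rw [band3 _ h0]
  exact ⟨Int.emod_nonneg _ (by norm_num), Int.emod_lt_of_pos _ (by norm_num)⟩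

theorem revV_nonneg (l : List Char) : 0 ≤ revV l := by
  induction l with
  | nil => simp [revV]
  | cons c t ih => have := rvC_bounds c; simp only [revV]; omega

theorem fwdA_split (a : Int) (l : List Char) : fwdA a l = a * 4 ^ l.length + fwdA 0 l := by
  induction l generalizing a with
  | nil => simp [fwdA]
  | cons c t ih =>
    simp only [fwdA, List.length_cons]
    rw [ih (a * 4 + valC c), ih (0 * 4 + valC c)]
    ring

theorem fwdA_bounds (l : List Char) : 0 ≤ fwdA 0 l ∧ fwdA 0 l < 4 ^ l.length := by
  induction l with
  | nil => simp [fwdA]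
  | cons c t ih =>
    have hv := valC_bounds c
    have h4 : (0:Int) < 4 ^ t.length := by positivity
    simp only [fwdA, List.length_cons]
    rw [fwdA_split]
    constructor
    · nlinarith [ih.1]
    · have : (4:Int) ^ (t.length + 1) = 4 * 4 ^ t.length := by ring
      rw [this]
      nlinarith [ih.2]

theorem revV_append_singleton (l : List Char) (c : Char) :
    revV (l ++ [c]) = revV l + rvC c * 4 ^ l.length := by
  induction l with
  | nil => simp [revV]
  | cons a t ih =>
    simp only [List.cons_append, revV, List.length_cons, ih]
    ring

theorem fwdA_append (a : Int) (l1 l2 : List Char) : fwdA a (l1 ++ l2) = fwdA (fwdA a l1) l2 := by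
  induction l1 generalizing a with
  | nil => simp [fwdA]
  | cons c t ih => simp only [List.cons_append, fwdA]; exact ih _

theorem fwdA_mod_tail (h : Char) (t : List Char) : fwdA 0 (h :: t) % 4 ^ t.length = fwdA 0 t := by
  have hb := fwdA_bounds t
  have : fwdA 0 (h :: t) = valC h * 4 ^ t.length + fwdA 0 t := by
    simp only [fwdA]
    rw [fwdA_split]
    ring
  rw [this, add_comm, Int.add_mul_emod_self_right, Int.emod_eq_of_lt hb.1 hb.2]

theorem revV_div_tail (h : Char) (t : List Char) : revV (h :: t) / 4 = revV t := by
  have hr := rvC_bounds h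
  simp only [revV]
  omega

def step1 (k : Int) (st : Int × Int) (letter : Char) : Int × Int :=
  let kmer := st.1 <<< (2 : Nat)
  let letter_value : Int := PySem.Int.band ((letter.toNat : Int) >>> (1 : Nat)) 3
  let kmer := kmer + letter_value
  let rkmer := st.2 >>> (2 : Nat)
  let rev_letter_value := PySem.Int.band (letter_value + 2) 3
  let rkmer := rkmer + (rev_letter_value <<< (2 * (k - 1)).toNat)
  (kmer, rkmer)

theorem pow2_two_mul (KK : Nat) : ((2:Int) ^ (2 * KK)) = 4 ^ KK := by
  rw [pow_mul]; norm_num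

theorem step1_eq (KK : Nat) (st : Int × Int) (c : Char) :
    step1 ((KK:Int)+1) st c = (st.1 * 4 + valC c, st.2 / 4 + rvC c * 4 ^ KK) := by
  have h1 : ((KK:Int) + 1 - 1) = (KK:Int) := by ring
  have h2 : (2 * (KK:Int)).toNat = 2 * KK := by omega
  simp only [step1, valC, rvC, h1, h2, Int.shiftLeft_eq, Int.shiftRight_eq_div_pow, pow2_two_mul]
  norm_num

theorem L1 (KK : Nat) (l : List Char) : ∀ (q : List Char) (a : Int), q.length + l.length ≤ KK →
    l.foldl (step1 ((KK:Int)+1)) (a, 4 ^ (KK + 1 - q.length) * revV q) =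
      (fwdA a l, 4 ^ (KK + 1 - (q.length + l.length)) * revV (q ++ l)) := by
  induction l with
  | nil => intro q a h; simp [fwdA]
  | cons c t ih =>
    intro q a h
    have hp : q.length + 1 + t.length ≤ KK := by
      simp only [List.length_cons] at h; omega
    rw [List.foldl_cons, step1_eq]
    have hdiv : (4:Int) ^ (KK + 1 - q.length) * revV q / 4 + rvC c * 4 ^ KK
        = 4 ^ (KK + 1 - (q ++ [c]).length) * revV (q ++ [c]) := by
      have e1 : (4:Int) ^ (KK + 1 - q.length) = 4 * 4 ^ (KK - q.length) := by
        rw [← pow_succ']; congr 1; omega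
      rw [e1, mul_assoc, Int.mul_ediv_cancel_left _ (by norm_num), revV_append_singleton]
      have e2 : (4:Int) ^ KK = 4 ^ (KK - q.length) * 4 ^ q.length := by
        rw [← pow_add]; congr 1; omega
      have e3 : KK + 1 - (q ++ [c]).length = KK - q.length := by
        simp only [List.length_append, List.length_cons, List.length_nil]; omega
      rw [e3, e2]; ring
    rw [hdiv]
    have hres := ih (q ++ [c]) (a * 4 + valC c)
      (by simp only [List.length_append, List.length_cons, List.length_nil]; omega)
    simp only [List.length_append, List.length_cons, List.length_nil, List.append_assoc,
      List.singleton_append] at hres ⊢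
    have he : q.length + (0 + 1) + t.length = q.length + (t.length + 1) := by omega
    rw [he] at hres
    rw [hres]
    rfl

def step2 (k : Int) (acc : (Int × Int) × List (Int × Int)) (letter : Char) : (Int × Int) × List (Int × Int) :=
  let mask : Int := ((1 : Int) <<< (2 * k).toNat) - 1
  let kmer := acc.1.1 <<< (2 : Nat)
  let letter_value : Int := PySem.Int.band ((letter.toNat : Int) >>> (1 : Nat)) 3
  let kmer := kmer + letter_value
  let kmer := PySem.Int.band kmer mask
  let rkmer := acc.1.2 >>> (2 : Nat)
  let rev_letter_value := PySem.Int.band (letter_value + 2) 3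
  let rkmer := rkmer + (rev_letter_value <<< (2 * (k - 1)).toNat)
  ((kmer, rkmer), acc.2 ++ [(kmer, rkmer)])

theorem step2_eq (KK : Nat) (a b : Int) (out : List (Int × Int)) (c : Char) (ha : 0 ≤ a * 4 + valC c) :
    step2 ((KK:Int)+1) ((a, b), out) c =
      (((a * 4 + valC c) % 4 ^ (KK+1), b / 4 + rvC c * 4 ^ KK),
        out ++ [((a * 4 + valC c) % 4 ^ (KK+1), b / 4 + rvC c * 4 ^ KK)]) := by
  have h1 : ((KK:Int) + 1 - 1) = (KK:Int) := by ring
  have h2 : (2 * (KK:Int)).toNat = 2 * KK := by omega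
  have h3 : (2 * ((KK:Int) + 1)).toNat = 2 * (KK + 1) := by omega
  have hsh : a <<< (2 : Nat) = a * 4 := by rw [Int.shiftLeft_eq]; norm_num
  have hsh2 : b >>> (2 : Nat) = b / 4 := by rw [Int.shiftRight_eq_div_pow]; norm_num
  have hv : PySem.Int.band ((c.toNat : Int) >>> (1 : Nat)) 3 = valC c := rfl
  have hrv : PySem.Int.band (valC c + 2) 3 = rvC c := rfl
  have hshl : rvC c <<< (2 * KK) = rvC c * 4 ^ KK := by rw [Int.shiftLeft_eq, pow2_two_mul]
  have hmask : ∀ x : Int, 0 ≤ x → PySem.Int.band x ((1:Int) <<< (2 * (KK + 1)) - 1) = x % 4 ^ (KK + 1) := by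
    intro x hx
    have hm : ((1:Int) <<< (2 * (KK + 1)) - 1) = 2 ^ (2 * (KK + 1)) - 1 := by
      rw [Int.shiftLeft_eq]; ring
    rw [hm, band_two_pow_sub_one x _ hx, pow2_two_mul (KK+1)]
  simp only [step2, h1, h2, h3, hv, hrv]
  rw [hmask _ (by rw [hsh]; exact ha), hsh, hsh2, hshl]

def wins : List Char → List Char → List (Int × Int)
  | _, [] => []
  | w, c :: rest => (fwdA 0 (w ++ [c]), revV (w ++ [c])) :: wins ((w ++ [c]).tail) rest

theorem L2 (KK : Nat) (rest : List Char) : ∀ (w : List Char) (a b : Int) (out : List (Int × Int)),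
    w.length = KK → 0 ≤ a → a % 4 ^ KK = fwdA 0 w → 0 ≤ b → b / 4 = revV w →
    (rest.foldl (step2 ((KK:Int)+1)) ((a, b), out)).2 = out ++ wins w rest := by
  induction rest with
  | nil => intros; simp [wins]
  | cons c rest' ih =>
    intro w a b out hw ha0 ha hb0 hb
    have hv := valC_bounds c
    have ha4 : 0 ≤ a * 4 + valC c := by omega
    rw [List.foldl_cons, step2_eq KK a b out c ha4]
    have hlen : (w ++ [c]).length = KK + 1 := by simp [hw]
    have hfb := fwdA_bounds (w ++ [c])
    rw [hlen] at hfb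
    have hfe : fwdA 0 (w ++ [c]) = fwdA 0 w * 4 + valC c := by
      rw [fwdA_append]; simp only [fwdA]
    have hkey : (a * 4 + valC c) % 4 ^ (KK + 1) = fwdA 0 (w ++ [c]) := by
      have hsplit : a = 4 ^ KK * (a / 4 ^ KK) + fwdA 0 w := by
        rw [← ha]; exact (Int.mul_ediv_add_emod a _).symm
      have hdecomp : a * 4 + valC c = fwdA 0 (w ++ [c]) + a / 4 ^ KK * 4 ^ (KK + 1) := by
        rw [hfe, pow_succ]
        nlinarith [hsplit]
      rw [hdecomp, Int.add_mul_emod_self_right, Int.emod_eq_of_lt hfb.1 hfb.2]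
    have hrev : b / 4 + rvC c * 4 ^ KK = revV (w ++ [c]) := by
      rw [hb, revV_append_singleton, hw]
    rw [hkey, hrev]
    obtain ⟨h, t, he⟩ : ∃ h t, w ++ [c] = h :: t := by
      cases w with
      | nil => exact ⟨c, [], rfl⟩
      | cons x xs => exact ⟨x, xs ++ [c], rfl⟩
    have htl : t.length = KK := by
      have := hlen; rw [he] at this; simpa using this
    have hres := ih ((w ++ [c]).tail) (fwdA 0 (w ++ [c])) (revV (w ++ [c]))
      (out ++ [(fwdA 0 (w ++ [c]), revV (w ++ [c]))])
      (by rw [he]; simpa using htl)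
      (fwdA_bounds _).1
      (by rw [he]; simp only [List.tail_cons]; rw [← htl]; exact fwdA_mod_tail h t)
      (revV_nonneg _)
      (by rw [he]; simp only [List.tail_cons]; exact revV_div_tail h t)
    rw [hres]
    simp [wins]

def stepB (st : Int × Int × Int) (c : Char) : Int × Int × Int :=
  let v : Int := PySem.Int.band ((c.toNat : Int) >>> (1 : Nat)) 3
  (st.1 * 4 + v, st.2.1 + PySem.Int.band (v + 2) 3 * st.2.2, st.2.2 * 4)

theorem FB (ws : List Char) : ∀ (a r : Int) (j : Nat),
    ws.foldl stepB (a, r, 4 ^ j) = (fwdA a ws, r + 4 ^ j * revV ws, 4 ^ (j + ws.length)) := by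
  induction ws with
  | nil => intro a r j; simp [fwdA, revV]
  | cons c t ih =>
    intro a r j
    have hst : stepB (a, r, 4 ^ j) c = (a * 4 + valC c, r + rvC c * 4 ^ j, 4 ^ (j + 1)) := by
      simp only [stepB, valC, rvC]
      refine congrArg _ (congrArg _ ?_)
      ring
    rw [List.foldl_cons, hst, ih]
    simp only [fwdA, revV, List.length_cons, Prod.mk.injEq]
    exact ⟨trivial, by ring, by congr 1; omega⟩

theorem drop_succ_window (w : List Char) (c : Char) (rest : List Char) (j : Nat) :
    (w ++ c :: rest).drop (j + 1) = ((w ++ [c]).tail ++ rest).drop j := by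
  cases w with
  | nil => simp
  | cons x xs => simp [List.drop_succ_cons]

theorem W (KK : Nat) (rest : List Char) : ∀ (w : List Char), w.length = KK →
    wins w rest = (List.range rest.length).map (fun j =>
      (fwdA 0 (((w ++ rest).drop j).take (KK + 1)), revV (((w ++ rest).drop j).take (KK + 1)))) := by
  induction rest with
  | nil => intros; simp [wins]
  | cons c rest' ih =>
    intro w hw
    have hlen : (w ++ [c]).length = KK + 1 := by simp [hw]
    have h0 : ((w ++ c :: rest').drop 0).take (KK + 1) = w ++ [c] := by
      have : w ++ c :: rest' = (w ++ [c]) ++ rest' := by simp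
      rw [List.drop_zero, this, List.take_left' hlen]
    have htail : (w ++ [c]).tail.length = KK := by
      cases w <;> simp_all
    simp only [wins, List.length_cons, List.range_succ_eq_map, List.map_cons, List.map_map]
    rw [h0, ih ((w ++ [c]).tail) htail]
    congr 1
    apply List.map_congr_left
    intro j _
    simp only [Function.comp_apply, drop_succ_window]

theorem main (text : String) (k : Int) (hpre : 1 ≤ k) : stream_kmers text k = stream_kmers_alt text k := by
  obtain ⟨KK, hk⟩ : ∃ KK : Nat, k = (KK:Int) + 1 := ⟨(k-1).toNat, by omega⟩
  subst hk
  set L := text.toList with hL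
  have hk1 : (KK:Int) + 1 - 1 = ((KK:Nat):Int) := by ring
  have hA : stream_kmers text ((KK:Int)+1) =
      ((L.drop KK).foldl (step2 ((KK:Int)+1)) ((L.take KK).foldl (step1 ((KK:Int)+1)) (0,0), ([]:List (Int × Int)))).2 := by
    have hA0 : stream_kmers text ((KK:Int)+1) =
        ((PySem.List.slice L (some ((KK:Int)+1-1)) none).foldl (step2 ((KK:Int)+1))
          ((PySem.List.slice L none (some ((KK:Int)+1-1))).foldl (step1 ((KK:Int)+1)) (0,0), ([]:List (Int × Int)))).2 := rfl
    rw [hA0, hk1, PySem.List.slice_to_natCast, PySem.List.slice_from_natCast]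
  have hB : stream_kmers_alt text ((KK:Int)+1) =
      (List.range (L.length - KK)).map (fun j =>
        (fwdA 0 ((L.drop j).take (KK+1)), revV ((L.drop j).take (KK+1)))) := by
    have hB0 : stream_kmers_alt text ((KK:Int)+1) =
        (PySem.List.pyRange 0 ((L.length:Int) - ((KK:Int)+1) + 1) 1).map (fun i =>
          let st := (PySem.List.slice L (some i) (some (i + ((KK:Int)+1)))).foldl stepB (0,0,1)
          (st.1, st.2.1)) := rfl
    rw [hB0, PySem.List.pyRange_one, List.map_map]
    have hN : (((L.length:Int) - ((KK:Int)+1) + 1) - 0).toNat = L.length - KK := by omega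
    rw [hN]
    apply List.map_congr_left
    intro j _
    simp only [Function.comp_apply, zero_add]
    have hc : (j:Int) + ((KK:Int)+1) = ((j:Nat):Int) + (((KK+1:Nat)):Int) := by push_cast; ring
    rw [hc, PySem.List.slice_natCast_add]
    have hinit : ((0:Int),(0:Int),(1:Int)) = ((0:Int),(0:Int),(4:Int)^(0:Nat)) := by norm_num
    rw [hinit, FB]
    simp
  by_cases hn : L.length ≤ KK
  · have hd : L.drop KK = [] := List.drop_eq_nil_of_le hn
    have hz : L.length - KK = 0 := by omega
    rw [hA, hB, hd, hz]
    simp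
  · rw [not_le] at hn
    have hP : (L.take KK).length = KK := by simp; omega
    have hfb := fwdA_bounds (L.take KK)
    rw [hP] at hfb
    have h1' : (L.take KK).foldl (step1 ((KK:Int)+1)) (0, 0) = (fwdA 0 (L.take KK), 4 * revV (L.take KK)) := by
      have h := L1 KK (L.take KK) [] 0 (by simp [hP])
      simpa [revV, hP, show KK + 1 - (0 + KK) = 1 by omega] using h
    have h2 := L2 KK (L.drop KK) (L.take KK) (fwdA 0 (L.take KK)) (4 * revV (L.take KK)) []
      hP hfb.1 (Int.emod_eq_of_lt hfb.1 hfb.2)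
      (mul_nonneg (by norm_num) (revV_nonneg _))
      (Int.mul_ediv_cancel_left _ (by norm_num))
    rw [hA, h1', h2, W KK (L.drop KK) (L.take KK) hP, hB]
    simp [List.take_append_drop, List.length_drop]

-- ===== VERDICT (by name: the statement is the Claim_ definition above) =====
theorem stream_kmers_spec : Claim_equal_stream_kmers := by
  intro text k _ hpre
  unfold Spec_stream_kmers
  exact main text k hpre
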